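-- pv_equiv track=rewrite | github.com/phredmund/AdventofCode2021 | Day_03/main.py | assemble_readings
-- ===== SOURCE A (Python) =====
-- def add_pos(data, position):
--     counter = 0
--     for num in data:
--         counter = counter + int(num[position])
--     return counter
--
-- def assemble_readings(data):
--     gamma = ""
--     epsilon = ""
--     for bit in range(len(data[0])):
--         if add_pos(data, bit) >= len(data)/2:
--             gamma = gamma + "1"
--             epsilon = epsilon + "0"
--         else:
--             gamma = gamma + "0"
--             epsilon = epsilon + "1"
--     return gamma, epsilon
-- ===== SOURCE B (Python) =====
-- def assemble_readings(data):
--     n = len(data)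
--     counts = [0] * len(data[0])
--     for num in data:
--         counts = [c + int(num[i]) for i, c in enumerate(counts)]
--     gamma = "".join("1" if 2 * c >= n else "0" for c in counts)
--     epsilon = "".join("0" if 2 * c >= n else "1" for c in counts)
--     return gamma, epsilon
-- ===== Notes on version B (the rewrite author's own statement) =====
-- stated objective: alternative
-- what changed: Replaces the per-column rescans (add_pos called once per bit position, each scanning the whole list) with a single row-major pass that maintains a per-column counts table, then builds gamma and epsilon from the table using the exact integer threshold 2*c >= n.
import Mathlib
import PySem

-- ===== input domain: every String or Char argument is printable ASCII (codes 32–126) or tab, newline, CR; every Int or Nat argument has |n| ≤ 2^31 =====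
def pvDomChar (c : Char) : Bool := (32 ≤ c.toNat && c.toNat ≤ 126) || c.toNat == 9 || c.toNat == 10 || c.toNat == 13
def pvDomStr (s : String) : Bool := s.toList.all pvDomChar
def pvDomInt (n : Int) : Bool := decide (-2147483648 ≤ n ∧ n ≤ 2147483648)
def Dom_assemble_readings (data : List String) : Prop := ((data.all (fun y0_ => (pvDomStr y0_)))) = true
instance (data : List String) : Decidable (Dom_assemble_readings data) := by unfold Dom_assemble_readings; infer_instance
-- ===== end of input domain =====

-- B replaces A's per-column rescans with one row-major pass over a maintained counts table; return value only, no mutation.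

-- ===== PORT A =====
-- int(num[position]): pyGet? = none is Python's IndexError, ofChars? = none is ValueError;
-- both are excluded by Pre_, so the .getD 0 default is never reached on admitted inputs.
def pvDigit (num : String) (position : Int) : Int :=
  ((PySem.Str.pyGet? num position).bind (fun c => PySem.Int.ofChars? [c])).getD 0

def addPos (data : List String) (position : Int) : Int :=
  data.foldl (fun counter num => counter + pvDigit num position) 0

-- 'addPos(data, bit) >= len(data)/2' is ported as '2 * counter >= len(data)': exact for these integers.
def assemble_readings (data : List String) : String × String :=
  let n : Int := data.length
  let w : Int := PySem.Str.len (PySem.List.pyGetD data 0 "")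
  let ge := (PySem.List.pyRange 0 w 1).foldl
      (fun (ge : List Char × List Char) bit =>
        if 2 * addPos data bit ≥ n then (ge.1 ++ ['1'], ge.2 ++ ['0'])
        else (ge.1 ++ ['0'], ge.2 ++ ['1'])) ([], [])
  (String.mk ge.1, String.mk ge.2)

-- ===== PORT B =====
def assemble_readings_alt (data : List String) : String × String :=
  let n : Int := data.length
  let w : Int := PySem.Str.len (PySem.List.pyGetD data 0 "")
  let counts := data.foldl
      (fun counts num => (PySem.List.enumerate counts).map (fun p => p.2 + pvDigit num p.1))
      (List.replicate w.toNat 0)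
  (String.mk (counts.map (fun c => if 2 * c ≥ n then '1' else '0')),
   String.mk (counts.map (fun c => if 2 * c ≥ n then '0' else '1')))

-- ===== PRECONDITION & SPEC =====
-- Exactly where Python A returns: data nonempty (data[0]), every row at least as long as the
-- first one's prefix A reads (IndexError otherwise), and the read characters decimal digits
-- (int() raises ValueError otherwise).
def Pre_assemble_readings (data : List String) : Prop :=
  data ≠ [] ∧ ∀ s ∈ data, (data.headD "").toList.length ≤ s.toList.length ∧
    ((s.toList.take (data.headD "").toList.length).all Char.isDigit) = true
instance (data : List String) : Decidable (Pre_assemble_readings data) := by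
  unfold Pre_assemble_readings; infer_instance

def pvWitness_assemble_readings : List String := ["10", "11", "01"]

def Spec_assemble_readings (data : List String) (out : String × String) : Prop := out = assemble_readings_alt data
instance (data : List String) (out : String × String) : Decidable (Spec_assemble_readings data out) := by unfold Spec_assemble_readings; infer_instance

-- ===== CLAIM (what is proved, stated in full; the proofs are below) =====
def Claim_equal_assemble_readings : Prop := ∀ (data : List String), Dom_assemble_readings data → Pre_assemble_readings data → Spec_assemble_readings data (assemble_readings data)

-- ===== LEMMAS AND PROOFS =====

-- enumerate commutes with map (index-preserving)
theorem pv_enumerate_map {α β : Type} (l : List α) (g : α → β) (s : Int) :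
    PySem.List.enumerate (l.map g) s = (PySem.List.enumerate l s).map (fun p => (p.1, g p.2)) := by
  induction l generalizing s with
  | nil => simp [PySem.List.enumerate_nil]
  | cons x xs ih => simp [PySem.List.enumerate_cons, ih]

-- enumerating an enumerated list pairs each element with itself
theorem pv_enumerate_enumerate {α : Type} (l : List α) (s : Int) :
    PySem.List.enumerate (PySem.List.enumerate l s) s
      = (PySem.List.enumerate l s).map (fun p => (p.1, p)) := by
  induction l generalizing s with
  | nil => simp [PySem.List.enumerate_nil]
  | cons x xs ih => simp [PySem.List.enumerate_cons, ih]

theorem pv_addPos_cons (num : String) (rest : List String) (i : Int) :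
    addPos (num :: rest) i = pvDigit num i + addPos rest i := by
  simp [addPos, List.foldl_cons, PySem.List.foldl_add]

-- B's counts fold, characterised against A's addPos, for any start table
theorem pv_counts_fold (data : List String) (init : List Int) :
    data.foldl
        (fun counts num => (PySem.List.enumerate counts).map (fun p => p.2 + pvDigit num p.1))
        init
      = (PySem.List.enumerate init 0).map (fun p => p.2 + addPos data p.1) := by
  induction data generalizing init with
  | nil => simp [addPos]
  | cons num rest ih =>
    rw [List.foldl_cons, ih, pv_enumerate_map, pv_enumerate_enumerate, List.map_map, List.map_map]
    refine List.map_congr_left (fun p _ => ?_)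
    simp [pv_addPos_cons]
    ring


theorem pv_enumerate_replicate (n : Nat) (s : Int) :
    PySem.List.enumerate (List.replicate n (0 : Int)) s
      = (List.range n).map (fun (k : Nat) => ((s + k : Int), (0 : Int))) := by
  induction n generalizing s with
  | zero => simp [PySem.List.enumerate_nil]
  | succ m ih =>
    rw [List.replicate_succ, PySem.List.enumerate_cons, ih, List.range_succ_eq_map]
    simp only [List.map_cons, List.map_map, Nat.cast_zero, add_zero, List.cons.injEq]
    refine ⟨trivial, List.map_congr_left (fun k _ => ?_)⟩
    simp only [Function.comp_apply]
    congr 1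
    push_cast
    ring

-- A's gamma/epsilon fold appends one character per bit
theorem pv_pair_fold (data : List String) (n : Int) (l : List Int) (g e : List Char) :
    l.foldl
        (fun (ge : List Char × List Char) bit =>
          if 2 * addPos data bit ≥ n then (ge.1 ++ ['1'], ge.2 ++ ['0'])
          else (ge.1 ++ ['0'], ge.2 ++ ['1'])) (g, e)
      = (g ++ l.map (fun bit => if 2 * addPos data bit ≥ n then '1' else '0'),
         e ++ l.map (fun bit => if 2 * addPos data bit ≥ n then '0' else '1')) := by
  induction l generalizing g e with
  | nil => simp
  | cons b bs ih =>
    by_cases h : 2 * addPos data b ≥ n <;> simp [h, ih]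

-- ===== VERDICT (by name: the statement is the Claim_ definition above) =====
theorem assemble_readings_spec : Claim_equal_assemble_readings := by
  intro data _ _
  unfold Spec_assemble_readings assemble_readings assemble_readings_alt
  simp only [pv_pair_fold, pv_counts_fold, pv_enumerate_replicate, PySem.List.pyRange_one,
    List.map_map, List.nil_append, Prod.mk.injEq]
  refine ⟨?_, ?_⟩ <;>
    exact congrArg String.mk (List.map_congr_left (fun k _ => by simp))
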